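-- pv_equiv track=rewrite | github.com/crescis/DFL_expeiment_record | experiments_251022/decentralized_federated_learning-master/data/preprocess.py | _assign_class_groups
-- ===== SOURCE A (Python) =====
-- from typing import List
--
-- def _even_sizes(total: int, parts: int) -> List[int]:
--     base = total // parts
--     rem  = total % parts
--     return [base + (1 if i < rem else 0) for i in range(parts)]
--
-- def _assign_class_groups(num_classes: int, client_num: int) -> List[List[int]]:
--     classes = list(range(num_classes))
--     groups: List[List[int]] = [[] for _ in range(client_num)]
--     if client_num <= num_classes:
--         sizes = _even_sizes(num_classes, client_num)  # 每人拿多少类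
--         ptr = 0
--         for i, k in enumerate(sizes):
--             groups[i] = classes[ptr:ptr+k]
--             ptr += k
--     else:
--         for i, c in enumerate(classes):
--             groups[i % client_num].append(c)
--     return groups
-- ===== SOURCE B (Python) =====
-- from typing import List
--
-- def _assign_class_groups(num_classes: int, client_num: int) -> List[List[int]]:
--     # Single uniform pass: contiguous slices of even sizes (first `rem` clients get one extra).
--     if client_num <= 0:
--         return []
--     classes = list(range(num_classes))
--     base, rem = divmod(num_classes, client_num)
--     groups: List[List[int]] = []
--     ptr = 0
--     for i in range(client_num):
--         k = base + (1 if i < rem else 0)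
--         groups.append(classes[ptr:ptr + k])
--         ptr += k
--     return groups
-- ===== Notes on version B (the rewrite author's own statement) =====
-- stated objective: simpler
-- what changed: B replaces A's two differently-shaped branches (index-assignment over precomputed even sizes vs round-robin modular append) with one uniform contiguous-slicing pass that computes each client's size on the fly, plus an early return of [] when client_num <= 0.
import Mathlib
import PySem

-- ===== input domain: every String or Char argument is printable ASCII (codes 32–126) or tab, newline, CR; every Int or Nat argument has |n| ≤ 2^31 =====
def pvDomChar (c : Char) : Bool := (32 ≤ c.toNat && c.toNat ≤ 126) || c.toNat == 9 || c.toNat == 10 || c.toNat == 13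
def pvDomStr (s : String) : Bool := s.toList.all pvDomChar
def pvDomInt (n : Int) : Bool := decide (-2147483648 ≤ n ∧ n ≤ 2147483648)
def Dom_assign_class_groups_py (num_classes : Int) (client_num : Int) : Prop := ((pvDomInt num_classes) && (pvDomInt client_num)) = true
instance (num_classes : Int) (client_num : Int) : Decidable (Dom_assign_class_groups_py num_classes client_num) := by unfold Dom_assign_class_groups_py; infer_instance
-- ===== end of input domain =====

-- B replaces A's two branches (slicing-by-even-sizes vs round-robin append) with one uniform
-- contiguous-slicing pass; objective: simpler. Equivalence of RETURN values; neither mutates input.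

-- ===== PORT A =====
def even_sizes_py (total : Int) (parts : Int) : List Int :=
  let base := PySem.Int.floordiv total parts
  let rem := PySem.Int.mod total parts
  (PySem.List.pyRange 0 parts 1).map (fun i => base + (if i < rem then 1 else 0))

def assign_class_groups_py (num_classes : Int) (client_num : Int) : List (List Int) :=
  let classes := PySem.List.pyRange 0 num_classes 1
  let groups : List (List Int) := (PySem.List.pyRange 0 client_num 1).map (fun _ => [])
  if client_num ≤ num_classes then
    let sizes := even_sizes_py num_classes client_num
    ((PySem.List.enumerate sizes 0).foldl
      (fun (st : List (List Int) × Int) ik =>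
        (st.1.set ik.1.toNat (PySem.List.slice classes (some st.2) (some (st.2 + ik.2))),
         st.2 + ik.2))
      (groups, 0)).1
  else
    (PySem.List.enumerate classes 0).foldl
      (fun (g : List (List Int)) ic =>
        g.modify (PySem.Int.mod ic.1 client_num).toNat (fun l => l ++ [ic.2]))
      groups

-- ===== PORT B =====
def assign_class_groups_py_alt (num_classes : Int) (client_num : Int) : List (List Int) :=
  if client_num ≤ 0 then []
  else
    let classes := PySem.List.pyRange 0 num_classes 1
    let base := PySem.Int.floordiv num_classes client_num
    let rem := PySem.Int.mod num_classes client_num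
    ((PySem.List.pyRange 0 client_num 1).foldl
      (fun (st : List (List Int) × Int) i =>
        let k := base + (if i < rem then 1 else 0)
        (st.1 ++ [PySem.List.slice classes (some st.2) (some (st.2 + k))], st.2 + k))
      ([], 0)).1

-- ===== PRECONDITION & SPEC =====
-- Pre_ excludes exactly the inputs where A raises ZeroDivisionError (client_num = 0 with
-- num_classes ≥ 0, which reaches _even_sizes's division by zero); B returns [] there.
def Pre_assign_class_groups_py (num_classes : Int) (client_num : Int) : Prop :=
  ¬ (client_num = 0 ∧ 0 ≤ num_classes)
instance (num_classes : Int) (client_num : Int) : Decidable (Pre_assign_class_groups_py num_classes client_num) := by unfold Pre_assign_class_groups_py; infer_instance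

def pvWitness_assign_class_groups_py : Int × Int := (7, 3)

def Spec_assign_class_groups_py (num_classes : Int) (client_num : Int) (out : List (List Int)) : Prop := out = assign_class_groups_py_alt num_classes client_num
instance (num_classes : Int) (client_num : Int) (out : List (List Int)) : Decidable (Spec_assign_class_groups_py num_classes client_num out) := by unfold Spec_assign_class_groups_py; infer_instance

-- ===== CLAIM (what is proved, stated in full; the proofs are below) =====
def Claim_equal_assign_class_groups_py : Prop := ∀ (num_classes : Int) (client_num : Int), Dom_assign_class_groups_py num_classes client_num → Pre_assign_class_groups_py num_classes client_num → Spec_assign_class_groups_py num_classes client_num (assign_class_groups_py num_classes client_num)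


-- ===== LEMMAS AND PROOFS =====

-- consecutive slices of `classes`, one per requested size
def pvChunks (classes : List Int) : Int → List Int → List (List Int)
  | _, [] => []
  | ptr, k :: ks =>
      PySem.List.slice classes (some ptr) (some (ptr + k)) :: pvChunks classes (ptr + k) ks

lemma pvB_fold (classes : List Int) (base rem : Int) :
    ∀ (l : List Int) (acc : List (List Int)) (ptr : Int),
    (l.foldl (fun (st : List (List Int) × Int) i =>
        (st.1 ++ [PySem.List.slice classes (some st.2) (some (st.2 + (base + (if i < rem then 1 else 0))))],
         st.2 + (base + (if i < rem then 1 else 0)))) (acc, ptr)).1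
      = acc ++ pvChunks classes ptr (l.map (fun i => base + (if i < rem then 1 else 0))) := by
  intro l
  induction l with
  | nil => intro acc ptr; simp [pvChunks]
  | cons x xs ih =>
      intro acc ptr
      simp only [List.foldl_cons, List.map_cons, pvChunks]
      rw [ih]
      simp

lemma pvA_fold (classes : List Int) :
    ∀ (ks : List Int) (j : Int) (g : List (List Int)) (ptr : Int),
    0 ≤ j → g.length = j.toNat + ks.length →
    ((PySem.List.enumerate ks j).foldl
        (fun (st : List (List Int) × Int) ik =>
          (st.1.set ik.1.toNat (PySem.List.slice classes (some st.2) (some (st.2 + ik.2))),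
           st.2 + ik.2)) (g, ptr)).1
      = g.take j.toNat ++ pvChunks classes ptr ks := by
  intro ks
  induction ks with
  | nil =>
      intro j g ptr hj hlen
      simp only [PySem.List.enumerate_nil, List.foldl_nil, pvChunks, List.append_nil]
      exact (List.take_of_length_le (by simp at hlen; omega)).symm
  | cons k ks ih =>
      intro j g ptr hj hlen
      have hlen' : g.length = j.toNat + ks.length + 1 := by simp at hlen; omega
      have hjlt : j.toNat < g.length := by omega
      rw [PySem.List.enumerate_cons]
      simp only [List.foldl_cons]
      rw [ih (j + 1) _ _ (by omega) (by simp [List.length_set]; omega)]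
      have hset : (g.set j.toNat (PySem.List.slice classes (some ptr) (some (ptr + k)))).take (j + 1).toNat
          = g.take j.toNat ++ [PySem.List.slice classes (some ptr) (some (ptr + k))] := by
        rw [List.set_eq_take_append_cons_drop, if_pos hjlt]
        have h1 : (j + 1).toNat = j.toNat + 1 := by omega
        rw [h1, show j.toNat + 1 = (g.take j.toNat).length + 1 by
          simp [List.length_take]; omega]
        rw [List.take_append]
        simp
      rw [hset, pvChunks]
      simp

lemma pvModify_at (v : Int) (h : List (List Int)) (a : List Int) (t : List (List Int)) :
    (h ++ a :: t).modify h.length (fun l => l ++ [v]) = h ++ (a ++ [v]) :: t := by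
  induction h with
  | nil => simp [List.modify]
  | cons x xs ih => simpa [List.modify] using ih

lemma pvRR_fold (cn : Int) :
    ∀ (xs : List Int) (j : Int) (h : List (List Int)) (m : Nat),
    h.length = j.toNat → 0 ≤ j → xs.length ≤ m → j + m ≤ cn →
    ((PySem.List.enumerate xs j).foldl
        (fun (g : List (List Int)) ic =>
          g.modify (PySem.Int.mod ic.1 cn).toNat (fun l => l ++ [ic.2]))
        (h ++ List.replicate m []))
      = h ++ xs.map (fun x => [x]) ++ List.replicate (m - xs.length) [] := by
  intro xs
  induction xs with
  | nil => intro j h m _ _ _ _; simp [PySem.List.enumerate_nil]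
  | cons x xs ih =>
      intro j h m hh hj hxm hcn
      have hm1 : 1 ≤ m := by simp at hxm; omega
      have hcnpos : 0 < cn := by omega
      have hmod : PySem.Int.mod j cn = j := by
        rw [PySem.Int.mod_eq_emod_of_pos hcnpos]
        exact Int.emod_eq_of_lt hj (by omega)
      obtain ⟨m', rfl⟩ : ∃ m', m = m' + 1 := ⟨m - 1, by omega⟩
      have hrep : List.replicate (m' + 1) ([] : List Int) = [] :: List.replicate m' [] := rfl
      rw [PySem.List.enumerate_cons]
      simp only [List.foldl_cons]
      rw [hmod, hrep, ← hh, pvModify_at]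
      have hx : h ++ (([] : List Int) ++ [x]) :: List.replicate m' ([] : List Int)
          = (h ++ [[x]]) ++ List.replicate m' [] := by simp
      rw [hx, ih (j + 1) (h ++ [[x]]) m' (by simp [hh]; omega) (by omega)
        (by simp at hxm; omega) (by omega)]
      simp

lemma pvChunks_append (classes : List Int) :
    ∀ (ks1 ks2 : List Int) (ptr : Int),
    pvChunks classes ptr (ks1 ++ ks2)
      = pvChunks classes ptr ks1 ++ pvChunks classes (ptr + ks1.sum) ks2 := by
  intro ks1
  induction ks1 with
  | nil => intro ks2 ptr; simp [pvChunks]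
  | cons k ks ih => intro ks2 ptr; simp [pvChunks, ih, add_assoc]

lemma pvChunks_ones : ∀ (cs pre : List Int),
    pvChunks (pre ++ cs) (pre.length : Int) (List.replicate cs.length 1) = cs.map (fun x => [x]) := by
  intro cs
  induction cs with
  | nil => intro pre; simp [pvChunks]
  | cons x cs ih =>
      intro pre
      simp only [List.length_cons, List.replicate_succ, pvChunks, List.map_cons]
      have hs : PySem.List.slice (pre ++ x :: cs) (some (pre.length : Int))
          (some ((pre.length : Int) + 1)) = [x] := by
        have h : ((pre.length : Int) + 1) = ((pre.length + 1 : Nat) : Int) := by push_cast; ring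
        rw [h, PySem.List.slice_natCast]
        simp
      rw [hs, show (pre.length : Int) + 1 = (((pre ++ [x]).length : Nat) : Int) by simp,
        show pre ++ x :: cs = (pre ++ [x]) ++ cs by simp, ih]

lemma pvChunks_zeros (classes : List Int) :
    ∀ (b : Nat) (p : Nat),
    pvChunks classes ((p : Nat) : Int) (List.replicate b 0) = List.replicate b [] := by
  intro b
  induction b with
  | zero => intro p; simp [pvChunks]
  | succ b ih =>
      intro p
      simp only [List.replicate_succ, pvChunks, add_zero]
      rw [PySem.List.slice_natCast]
      simp [ih]

lemma pvChunks_nil_classes : ∀ (ks : List Int) (ptr : Int),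
    pvChunks ([] : List Int) ptr ks = List.replicate ks.length [] := by
  intro ks
  induction ks with
  | nil => intro ptr; simp [pvChunks]
  | cons k ks ih =>
      intro ptr
      simp [pvChunks, ih, List.replicate_succ, PySem.List.slice]

-- ===== VERDICT (by name: the statement is the Claim_ definition above) =====
theorem assign_class_groups_py_spec : Claim_equal_assign_class_groups_py := by
  intro nc cn _ hpre
  unfold Spec_assign_class_groups_py assign_class_groups_py assign_class_groups_py_alt even_sizes_py
  by_cases hcn0 : cn ≤ 0
  · -- no clients: both sides are []
    rw [if_pos hcn0]
    have hr : PySem.List.pyRange 0 cn 1 = [] := PySem.List.pyRange_one_eq_nil (by omega)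
    by_cases hb : cn ≤ nc
    · rw [if_pos hb]; simp [hr, PySem.List.enumerate_nil]
    · rw [if_neg hb]
      have hc : PySem.List.pyRange 0 nc 1 = [] := PySem.List.pyRange_one_eq_nil (by omega)
      simp [hr, hc, PySem.List.enumerate_nil]
  · rw [if_neg hcn0]
    have hcnpos : 0 < cn := by omega
    set classes := PySem.List.pyRange 0 nc 1 with hcl
    set base := PySem.Int.floordiv nc cn with hbase
    set rem := PySem.Int.mod nc cn with hrem
    have hB := pvB_fold classes base rem (PySem.List.pyRange 0 cn 1) [] 0
    simp only at hB
    rw [hB]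
    by_cases hb : cn ≤ nc
    · -- A's slicing branch: identical chunks
      rw [if_pos hb]
      have hA := pvA_fold classes ((PySem.List.pyRange 0 cn 1).map (fun i => base + (if i < rem then 1 else 0))) 0
        ((PySem.List.pyRange 0 cn 1).map (fun _ => ([] : List Int))) 0 (le_refl 0) (by simp)
      simp only [Int.toNat_zero, List.take_zero, List.nil_append] at hA
      exact hA
    · -- A's round-robin branch
      rw [if_neg hb]
      have hnccn : nc < cn := by omega
      by_cases hnc0 : nc ≤ 0
      · -- no classes at all
        have hc : classes = [] := PySem.List.pyRange_one_eq_nil (by omega)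
        rw [hc]
        simp [PySem.List.enumerate_nil, pvChunks_nil_classes, List.map_const']
      · have hncpos : 0 < nc := by omega
        have hbase0 : base = 0 := by
          rw [hbase, PySem.Int.floordiv_eq_ediv_of_pos hcnpos]
          exact Int.ediv_eq_zero_of_lt (by omega) hnccn
        have hremnc : rem = nc := by
          rw [hrem, PySem.Int.mod_eq_emod_of_pos hcnpos]
          exact Int.emod_eq_of_lt (by omega) hnccn
        -- A side
        have hlen : classes.length = nc.toNat := by
          rw [hcl]; simp [PySem.List.length_pyRange_one]
        have hgrp : (PySem.List.pyRange 0 cn 1).map (fun _ => ([] : List Int))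
            = List.replicate cn.toNat [] := by
          rw [List.map_const']; simp [PySem.List.length_pyRange_one]
        have hA := pvRR_fold cn classes 0 [] cn.toNat (by simp) (le_refl 0)
          (by omega) (by omega)
        simp only [List.nil_append] at hA
        rw [hgrp, hA]
        -- B side
        have hsplit : PySem.List.pyRange 0 cn 1
            = PySem.List.pyRange 0 nc 1 ++ PySem.List.pyRange nc cn 1 :=
          PySem.List.pyRange_one_append 0 nc cn (by omega) (by omega)
        have hmap1 : (PySem.List.pyRange 0 nc 1).map (fun i => base + (if i < rem then 1 else 0))
            = List.replicate nc.toNat 1 := by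
          rw [show (PySem.List.pyRange 0 nc 1).map (fun i => base + (if i < rem then 1 else 0))
              = (PySem.List.pyRange 0 nc 1).map (fun _ => (1 : Int)) from
            List.map_congr_left (by
              intro i hi
              rw [PySem.List.mem_pyRange_one] at hi
              rw [hbase0, hremnc, if_pos hi.2]; ring)]
          rw [List.map_const']; simp [PySem.List.length_pyRange_one]
        have hmap2 : (PySem.List.pyRange nc cn 1).map (fun i => base + (if i < rem then 1 else 0))
            = List.replicate (cn - nc).toNat 0 := by
          rw [show (PySem.List.pyRange nc cn 1).map (fun i => base + (if i < rem then 1 else 0))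
              = (PySem.List.pyRange nc cn 1).map (fun _ => (0 : Int)) from
            List.map_congr_left (by
              intro i hi
              rw [PySem.List.mem_pyRange_one] at hi
              rw [hbase0, hremnc, if_neg (by omega)]; ring)]
          rw [List.map_const']; simp [PySem.List.length_pyRange_one]
        rw [hsplit, List.map_append, hmap1, hmap2, pvChunks_append]
        have hones : pvChunks classes 0 (List.replicate nc.toNat 1) = classes.map (fun x => [x]) := by
          have := pvChunks_ones classes []
          simp only [List.nil_append, List.length_nil, Int.natCast_zero] at this
          rw [hlen] at this
          exact this
        have hsum : (List.replicate nc.toNat (1 : Int)).sum = ((nc.toNat : Nat) : Int) := by simp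
        rw [hones, hsum, zero_add, pvChunks_zeros classes (cn - nc).toNat nc.toNat, hlen]
        simp only [List.nil_append]
        congr 2
        omega
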